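-- pv_equiv track=rewrite | github.com/travissawyer/opti-msfa | scripts/msfa_optimization.py | all_filters_present
-- ===== SOURCE A (Python) =====
-- from itertools import permutations, product
--
-- def all_filters_present(avail_fils,N_filters):
--     '''
--     Helper function to make sure that only mosaic patterns including all available filters are used. This comes into play when using fewer filters than mosaic pattern locations.
--     '''
--     combos = []
--     for total in product(avail_fils, repeat=N_filters):
--         valid = 1
--         for i in avail_fils:
--             if not i in total:
--                 valid = 0
--         if valid == 1:
--             combos.append(total)
--
--     return combos
-- ===== SOURCE B (Python) =====
-- from itertools import product
--
-- def all_filters_present(avail_fils, N_filters):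
--     '''
--     Iterative DFS backtracking with an explicit stack: extend the mosaic prefix
--     one slot at a time, tracking the set of still-missing filters.  Prune a
--     branch as soon as the missing filters cannot fit in the remaining slots;
--     once nothing is missing, every completion is valid and is emitted in bulk.
--     '''
--     combos = []
--     stack = [((), set(avail_fils))]
--     while stack:
--         prefix, missing = stack.pop()
--         remaining = N_filters - len(prefix)
--         if len(missing) > remaining:
--             continue
--         if not missing:
--             for rest in product(avail_fils, repeat=remaining):
--                 combos.append(prefix + rest)
--             continue
--         for a in reversed(avail_fils):
--             stack.append((prefix + (a,), missing - {a}))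
--     return combos
-- ===== Notes on version B (the rewrite author's own statement) =====
-- stated objective: alternative
-- what changed: Replaces 'generate every tuple of product(avail_fils, repeat=N) and re-scan avail_fils for validity' with an explicit-stack DFS that extends a prefix slot by slot, maintains the set of still-missing filters, prunes any branch whose missing filters cannot fit in the remaining slots, and bulk-emits all completions once nothing is missing, producing the surjective tuples in the same lexicographic order.
import Mathlib
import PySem

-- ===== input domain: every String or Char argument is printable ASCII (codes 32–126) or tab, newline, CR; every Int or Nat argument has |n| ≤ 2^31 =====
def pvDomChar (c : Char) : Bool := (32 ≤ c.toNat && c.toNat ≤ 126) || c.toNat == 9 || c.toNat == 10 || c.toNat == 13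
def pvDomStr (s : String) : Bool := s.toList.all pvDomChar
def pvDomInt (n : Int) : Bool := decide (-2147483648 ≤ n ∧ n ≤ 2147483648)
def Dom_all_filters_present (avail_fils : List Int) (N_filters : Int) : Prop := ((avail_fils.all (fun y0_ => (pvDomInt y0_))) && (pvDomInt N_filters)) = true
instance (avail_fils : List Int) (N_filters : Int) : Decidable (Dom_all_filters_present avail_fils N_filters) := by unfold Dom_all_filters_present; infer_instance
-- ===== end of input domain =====

-- B replaces the filter-after-full-enumeration of itertools.product by DFS backtracking
-- that prunes branches whose missing filters cannot fit in the remaining slots (alternative algorithm).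

-- ===== PORT A =====
-- itertools.product(avail, repeat=n): first coordinate varies slowest.
def pyProduct (avail : List Int) : Nat → List (List Int)
  | 0 => [[]]
  | n + 1 => avail.flatMap (fun a => (pyProduct avail n).map (fun t => a :: t))

def all_filters_present (avail_fils : List Int) (N_filters : Int) : List (List Int) :=
  (pyProduct avail_fils N_filters.toNat).foldl
    (fun combos total =>
      let valid : Int := avail_fils.foldl (fun valid i => if ¬ (i ∈ total) then 0 else valid) 1
      if valid = 1 then combos ++ [total] else combos)
    []

-- ===== PORT B =====
-- 'for a in reversed(avail): stack.append((prefix+(a,), missing-{a}))', stack modelled head-first.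
def pushRev (pre missing : List Int) :
    List Int → List (List Int × List Int) → List (List Int × List Int)
  | [], st => st
  | a :: rest, st => pushRev pre missing rest ((pre ++ [a], PySem.Set.diff missing [a]) :: st)

theorem pushRev_eq (pre missing : List Int) (l : List Int) (st : List (List Int × List Int)) :
    pushRev pre missing l st
      = l.reverse.map (fun a => (pre ++ [a], PySem.Set.diff missing [a])) ++ st := by
  induction l generalizing st with
  | nil => rfl
  | cons a rest ih => simp [pushRev, ih]

theorem map_const_sum (l : List Int) (c : Nat) : (l.map (fun _ => c)).sum = l.length * c := by
  induction l with
  | nil => simp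
  | cons a t ih => simp [ih, Nat.succ_mul, Nat.add_comm]

-- Termination measure for the while-loop: a stack entry weighs (|avail|+1)^(remaining slots).
def pvStackMeasure (A N : Nat) (stack : List (List Int × List Int)) : Nat :=
  (stack.map (fun e => (A + 1) ^ (N - e.1.length))).sum

theorem pvStackMeasure_tail (A N : Nat) (e : List Int × List Int)
    (stack : List (List Int × List Int)) :
    pvStackMeasure A N stack < pvStackMeasure A N (e :: stack) := by
  have h : 0 < (A + 1) ^ (N - e.1.length) := Nat.pow_pos (Nat.succ_pos A)
  simp only [pvStackMeasure, List.map_cons, List.sum_cons]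
  omega

theorem pvStackMeasure_push (avail : List Int) (N : Nat) (pre missing : List Int)
    (stack : List (List Int × List Int)) (h : 1 ≤ N - pre.length) :
    pvStackMeasure avail.length N (pushRev pre missing avail.reverse stack)
      < pvStackMeasure avail.length N ((pre, missing) :: stack) := by
  rw [pushRev_eq, List.reverse_reverse]
  simp only [pvStackMeasure, List.map_append, List.sum_append, List.map_cons, List.sum_cons,
    List.map_map]
  have hconst : (avail.map ((fun e => (avail.length + 1) ^ (N - e.1.length)) ∘
      (fun a => (pre ++ [a], PySem.Set.diff missing [a]))))
      = avail.map (fun _ => (avail.length + 1) ^ (N - pre.length - 1)) := by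
    apply List.map_congr_left
    intro a _
    simp [Function.comp, Nat.sub_sub]
  rw [hconst, map_const_sum]
  have hpow : 0 < (avail.length + 1) ^ (N - pre.length - 1) :=
    Nat.pow_pos (Nat.succ_pos _)
  have hlt : avail.length * (avail.length + 1) ^ (N - pre.length - 1)
      < (avail.length + 1) ^ (N - pre.length) := by
    calc avail.length * (avail.length + 1) ^ (N - pre.length - 1)
        < (avail.length + 1) * (avail.length + 1) ^ (N - pre.length - 1) :=
          Nat.mul_lt_mul_of_lt_of_le (Nat.lt_succ_self _) (Nat.le_refl _) hpow
      _ = (avail.length + 1) ^ (N - pre.length - 1 + 1) := by ring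
      _ = (avail.length + 1) ^ (N - pre.length) := by
          congr 1
          omega
  omega

-- The while-loop of B: pop (prefix, missing); prune / bulk-emit / push the |avail| extensions.
def loopB (avail : List Int) (N : Nat) :
    List (List Int × List Int) → List (List Int) → List (List Int)
  | [], combos => combos
  | (pre, missing) :: stack, combos =>
    if h1 : missing.length > N - pre.length then loopB avail N stack combos
    else if h2 : missing.isEmpty then
      loopB avail N stack
        (combos ++ (pyProduct avail (N - pre.length)).map (fun t => pre ++ t))
    else
      loopB avail N (pushRev pre missing avail.reverse stack) combos
  termination_by stack _ => pvStackMeasure avail.length N stack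
  decreasing_by
  · exact pvStackMeasure_tail _ _ _ _
  · exact pvStackMeasure_tail _ _ _ _
  · have hre : avail.attach.reverse.unattach = avail.reverse := by
      simp
    rw [hre]
    apply pvStackMeasure_push
    have : 1 ≤ missing.length := by
      cases missing with
      | nil => simp at h2
      | cons x xs => simp
    omega

def all_filters_present_alt (avail_fils : List Int) (N_filters : Int) : List (List Int) :=
  loopB avail_fils N_filters.toNat [([], PySem.Set.ofList avail_fils)] []

-- ===== PRECONDITION & SPEC =====
-- A raises ValueError for a negative repeat count; Pre_ excludes exactly that.
def Pre_all_filters_present (avail_fils : List Int) (N_filters : Int) : Prop := 0 ≤ N_filters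
instance (avail_fils : List Int) (N_filters : Int) : Decidable (Pre_all_filters_present avail_fils N_filters) := by unfold Pre_all_filters_present; infer_instance
def pvWitness_all_filters_present : List Int × Int := ([1, 2], 2)

def Spec_all_filters_present (avail_fils : List Int) (N_filters : Int) (out : List (List Int)) : Prop := out = all_filters_present_alt avail_fils N_filters
instance (avail_fils : List Int) (N_filters : Int) (out : List (List Int)) : Decidable (Spec_all_filters_present avail_fils N_filters out) := by unfold Spec_all_filters_present; infer_instance

-- ===== CLAIM (what is proved, stated in full; the proofs are below) =====
def Claim_equal_all_filters_present : Prop := ∀ (avail_fils : List Int) (N_filters : Int), Dom_all_filters_present avail_fils N_filters → Pre_all_filters_present avail_fils N_filters → Spec_all_filters_present avail_fils N_filters (all_filters_present avail_fils N_filters)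

-- ===== LEMMAS AND PROOFS =====

-- Proof-side recursive description of the explicit-stack loop (one stack entry's contribution).
def dfsB (avail : List Int) : Nat → List Int → List Int → List (List Int)
  | n, pre, missing =>
    if missing.length > n then []
    else if missing.isEmpty then (pyProduct avail n).map (fun t => pre ++ t)
    else match n with
      | 0 => []  -- unreachable: 0 < missing.length ≤ n
      | Nat.succ m => avail.flatMap (fun a => dfsB avail m (pre ++ [a]) (PySem.Set.diff missing [a]))

theorem dfsB_succ (avail : List Int) (m : Nat) (pre missing : List Int)
    (h1 : ¬ missing.length > m + 1) (h2 : ¬ missing.isEmpty = true) :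
    dfsB avail (m + 1) pre missing
      = avail.flatMap (fun a => dfsB avail m (pre ++ [a]) (PySem.Set.diff missing [a])) := by
  have h2' : missing.isEmpty = false := by
    cases missing with
    | nil => simp at h2
    | cons x xs => rfl
  rw [dfsB.eq_def]
  simp [h1, h2']

theorem length_of_mem_pyProduct (avail : List Int) (n : Nat) (t : List Int)
    (h : t ∈ pyProduct avail n) : t.length = n := by
  induction n generalizing t with
  | zero => simp [pyProduct] at h; simp [h]
  | succ m ih =>
    simp only [pyProduct, List.mem_flatMap, List.mem_map] at h
    obtain ⟨a, _, s, hs, rfl⟩ := h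
    simp [ih s hs]

theorem valid_foldl (avail total : List Int) (v : Int) :
    avail.foldl (fun valid i => if ¬ (i ∈ total) then 0 else valid) v
      = if ∀ i ∈ avail, i ∈ total then v else 0 := by
  induction avail generalizing v with
  | nil => simp
  | cons a l ih =>
    simp only [List.foldl_cons]
    rw [ih]
    by_cases ha : a ∈ total
    · by_cases hl : ∀ i ∈ l, i ∈ total
      · simp [List.forall_mem_cons, ha, hl]
      · simp [List.forall_mem_cons, ha, hl]
    · simp [List.forall_mem_cons, ha]

theorem filter_map_flatMap {α β γ : Type} (l : List α) (g : α → List β)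
    (p : β → Bool) (f : β → γ) :
    ((l.flatMap g).filter p).map f
      = l.flatMap (fun a => ((g a).filter p).map f) := by
  induction l with
  | nil => rfl
  | cons a l ih => simp [List.flatMap_cons, List.filter_append, List.map_append, ih]

theorem dfsB_eq (avail : List Int) (n : Nat) (pre missing : List Int)
    (hnd : missing.Nodup)
    (hmem : ∀ i, i ∈ missing ↔ (i ∈ avail ∧ i ∉ pre)) :
    dfsB avail n pre missing
      = ((pyProduct avail n).filter
          (fun t => decide (∀ i ∈ avail, i ∈ pre ++ t))).map (fun t => pre ++ t) := by
  induction n generalizing pre missing with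
  | zero =>
    rw [dfsB]
    by_cases hlen : missing.length > 0
    · rw [if_pos hlen]
      obtain ⟨i, hi⟩ := List.exists_mem_of_length_pos hlen
      have hip := (hmem i).1 hi
      simp [pyProduct]
      exact ⟨i, hip.1, hip.2⟩
    · rw [if_neg hlen]
      have hm : missing = [] := by
        cases missing with
        | nil => rfl
        | cons x xs => simp at hlen
      rw [if_pos (by simp [hm])]
      have hd : decide (∀ i ∈ avail, i ∈ pre) = true :=
        decide_eq_true (fun i hi => by
          by_contra hnp
          have := (hmem i).2 ⟨hi, hnp⟩
          simp [hm] at this)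
      simp [pyProduct, List.filter, hd]
  | succ m ih =>
    rw [dfsB]
    by_cases hlen : missing.length > m + 1
    · rw [if_pos hlen]
      symm
      rw [List.map_eq_nil_iff, List.filter_eq_nil_iff]
      intro t ht
      simp only [decide_eq_true_eq]
      intro hall
      have hsub : missing ⊆ t := by
        intro i hi
        have hin := (hmem i).1 hi
        have := hall i hin.1
        rw [List.mem_append] at this
        exact this.resolve_left hin.2
      have hcard : missing.toFinset.card ≤ t.toFinset.card :=
        Finset.card_le_card (fun x hx => by
          rw [List.mem_toFinset] at hx ⊢
          exact hsub hx)
      rw [List.toFinset_card_of_nodup hnd] at hcard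
      have hle := t.toFinset_card_le
      rw [length_of_mem_pyProduct avail (m + 1) t ht] at hle
      omega
    · rw [if_neg hlen]
      by_cases hemp : missing = []
      · rw [if_pos (by simp [hemp])]
        have hfull : ∀ t ∈ pyProduct avail (m + 1),
            (fun t => decide (∀ i ∈ avail, i ∈ pre ++ t)) t = true := by
          intro t _
          refine decide_eq_true (fun i hi => List.mem_append.2 (Or.inl ?_))
          by_contra hnp
          have := (hmem i).2 ⟨hi, hnp⟩
          simp [hemp] at this
        rw [List.filter_eq_self.2 hfull]
      · rw [if_neg (by simp [hemp])]
        conv_rhs => rw [pyProduct]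
        rw [filter_map_flatMap]
        apply List.flatMap_congr
        intro a ha
        have hnd' : (PySem.Set.diff missing [a]).Nodup := by
          simp only [PySem.Set.diff]
          exact hnd.filter _
        have hdiff : ∀ i, i ∈ PySem.Set.diff missing [a] ↔ (i ∈ missing ∧ i ≠ a) := by
          intro i
          simp [PySem.Set.diff, List.mem_filter]
        have hmem' : ∀ i, i ∈ PySem.Set.diff missing [a] ↔ (i ∈ avail ∧ i ∉ pre ++ [a]) := by
          intro i
          rw [hdiff, hmem i]
          simp only [List.mem_append, List.mem_singleton]
          constructor
          · rintro ⟨⟨h1, h2⟩, h3⟩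
            exact ⟨h1, fun h => h.elim h2 h3⟩
          · rintro ⟨h1, h2⟩
            exact ⟨⟨h1, fun h => h2 (Or.inl h)⟩, fun h => h2 (Or.inr h)⟩
        rw [ih (pre ++ [a]) (PySem.Set.diff missing [a]) hnd' hmem']
        rw [List.filter_map, List.map_map]
        have hf : ((fun t => pre ++ t) ∘ fun t => a :: t) = (fun t => pre ++ [a] ++ t) := by
          funext t; simp
        have hp : ((fun t => decide (∀ i ∈ avail, i ∈ pre ++ t)) ∘ fun t => a :: t)
            = (fun t => decide (∀ i ∈ avail, i ∈ pre ++ [a] ++ t)) := by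
          funext t
          simp [List.append_assoc]
        rw [hf, hp]

theorem loopB_eq_flatMap (avail : List Int) (N : Nat)
    (stack : List (List Int × List Int)) (combos : List (List Int)) :
    loopB avail N stack combos
      = combos ++ stack.flatMap (fun e => dfsB avail (N - e.1.length) e.1 e.2) := by
  induction stack, combos using loopB.induct avail N with
  | case1 combos => rw [loopB]; simp
  | case2 pre missing stack combos h1 ih =>
    rw [loopB]
    simp only [dif_pos h1]
    rw [ih, List.flatMap_cons, dfsB.eq_def]
    simp [h1]
  | case3 pre missing stack combos h1 h2 ih =>
    rw [loopB]
    simp only [dif_neg h1, dif_pos h2]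
    rw [ih, List.flatMap_cons, dfsB.eq_def]
    simp only [if_neg h1, if_pos h2, List.append_assoc]
  | case4 pre missing stack combos h1 h2 ih =>
    rw [loopB]
    simp only [dif_neg h1, dif_neg h2]
    have hre : avail.attach.reverse.unattach = avail.reverse := by simp
    rw [hre] at ih
    rw [ih, pushRev_eq, List.reverse_reverse, List.flatMap_append, List.flatMap_map]
    have hmlen : 1 ≤ missing.length := by
      cases missing with
      | nil => simp at h2
      | cons x xs => simp
    obtain ⟨m, hm⟩ : ∃ m, N - pre.length = m + 1 :=
      ⟨N - pre.length - 1, by omega⟩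
    simp only [List.flatMap_cons]
    rw [hm, dfsB_succ avail m pre missing (by omega) h2]
    congr 1
    congr 1
    apply List.flatMap_congr
    intro a _
    have hlen : N - (pre ++ [a]).length = m := by
      simp only [List.length_append, List.length_singleton]
      omega
    rw [hlen]

theorem all_filters_present_spec : Claim_equal_all_filters_present := by
  intro avail N _ _
  unfold Spec_all_filters_present all_filters_present all_filters_present_alt
  have hbody : (fun (combos : List (List Int)) (total : List Int) =>
      let valid : Int := avail.foldl (fun valid i => if ¬ (i ∈ total) then 0 else valid) 1
      if valid = 1 then combos ++ [total] else combos)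
      = (fun combos total =>
          if decide (∀ i ∈ avail, i ∈ total) then combos ++ [total] else combos) := by
    funext combos total
    simp only [valid_foldl]
    by_cases h : ∀ i ∈ avail, i ∈ total
    · simp [h]
    · simp [h]
  rw [hbody, PySem.List.foldl_append_if_eq_filter]
  rw [loopB_eq_flatMap]
  simp only [List.flatMap_cons, List.flatMap_nil, List.append_nil, List.nil_append,
    List.length_nil, Nat.sub_zero]
  rw [dfsB_eq avail N.toNat [] (PySem.Set.ofList avail) (PySem.Set.nodup_ofList avail)
    (by intro i; simp [PySem.Set.mem_ofList])]
  simp only [List.nil_append, List.map_id_fun', List.map_id']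
  apply List.filter_congr
  intro t _
  rw [decide_eq_decide]
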